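-- pv_equiv track=rewrite | github.com/PennyDreadfulMTG/Penny-Dreadful-Tools | shared/text.py | unambiguous_prefixes
-- ===== SOURCE A (Python) =====
-- from typing import List
--
-- def unambiguous_prefixes(words: List[str]) -> List[str]:
--     prefixes = []
--     for w in words:
--         for i in range(1, len(w)):
--             prefix = w[0:i]
--             n = 0
--             for w2 in words:
--                 if w2.startswith(prefix):
--                     n += 1
--             if n == 1:
--                 prefixes.append(prefix)
--     return prefixes
-- ===== SOURCE B (Python) =====
-- from typing import List
--
-- def unambiguous_prefixes(words: List[str]) -> List[str]:
--     # Count, once, how many words each prefix (of any length) begins; then a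
--     # proper prefix is unambiguous iff its count is exactly 1.
--     allp = [w[:i] for w in words for i in range(1, len(w) + 1)]
--     counts = {}
--     for p in allp:
--         counts[p] = counts.get(p, 0) + 1
--     return [w[:i] for w in words for i in range(1, len(w)) if counts.get(w[:i], 0) == 1]
-- ===== Notes on version B (the rewrite author's own statement) =====
-- stated objective: faster
-- what changed: B builds a dictionary counting, in one pass, how many words begin with each prefix, then emits each proper prefix whose count is 1, removing A's rescan of all words for every prefix of every word.
import Mathlib
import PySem

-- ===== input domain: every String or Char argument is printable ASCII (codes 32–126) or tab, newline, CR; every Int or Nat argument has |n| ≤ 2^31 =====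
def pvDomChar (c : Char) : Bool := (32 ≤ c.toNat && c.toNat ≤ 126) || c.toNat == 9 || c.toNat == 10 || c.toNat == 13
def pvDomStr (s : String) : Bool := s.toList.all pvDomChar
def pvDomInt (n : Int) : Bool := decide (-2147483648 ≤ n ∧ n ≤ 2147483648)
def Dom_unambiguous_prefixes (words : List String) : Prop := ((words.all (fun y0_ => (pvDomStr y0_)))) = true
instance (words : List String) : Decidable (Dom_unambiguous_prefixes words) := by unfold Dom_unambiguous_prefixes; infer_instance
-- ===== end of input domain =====

-- B replaces A's per-prefix rescan of all words by one dictionary of prefix counts built in a single pass (objective: faster).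

-- ===== PORT A =====
def unambiguous_prefixes (words : List String) : List String :=
  words.foldl (fun prefixes w =>
    (PySem.List.pyRange 1 (PySem.Str.len w) 1).foldl (fun prefixes i =>
      let pre := PySem.Str.slice w (some 0) (some i)
      let n : Int := words.foldl (fun n w2 => if PySem.Str.startswith w2 pre then n + 1 else n) 0
      if n == 1 then prefixes ++ [pre] else prefixes) prefixes) []

-- ===== PORT B =====
-- allp = [w[:i] for w in words for i in range(1, len(w) + 1)]
def pvAllPrefixes (words : List String) : List String :=
  words.flatMap (fun w =>
    (PySem.List.pyRange 1 (PySem.Str.len w + 1) 1).map (fun i => PySem.Str.slice w (some 0) (some i)))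

def unambiguous_prefixes_alt (words : List String) : List String :=
  let counts : PySem.Dict String Int :=
    (pvAllPrefixes words).foldl (fun d p => d.insert p (d.getD p 0 + 1)) PySem.Dict.empty
  words.flatMap (fun w =>
    (PySem.List.pyRange 1 (PySem.Str.len w) 1).filterMap (fun i =>
      let pre := PySem.Str.slice w (some 0) (some i)
      if counts.getD pre 0 == 1 then some pre else none))

-- ===== PRECONDITION & SPEC =====
def Spec_unambiguous_prefixes (words : List String) (out : List String) : Prop := out = unambiguous_prefixes_alt words
instance (words : List String) (out : List String) : Decidable (Spec_unambiguous_prefixes words out) := by unfold Spec_unambiguous_prefixes; infer_instance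

-- ===== CLAIM (what is proved, stated in full; the proofs are below) =====
def Claim_equal_unambiguous_prefixes : Prop := ∀ (words : List String), Dom_unambiguous_prefixes words → Spec_unambiguous_prefixes words (unambiguous_prefixes words)

-- ===== LEMMAS AND PROOFS =====

lemma pv_filterMap_if {α β : Type} (c : α → Bool) (g : α → β) (l : List α) :
    l.filterMap (fun x => if c x then some (g x) else none) = (l.filter c).map g := by
  induction l with
  | nil => rfl
  | cons a t ih => by_cases h : c a <;> simp [h, ih]

lemma pv_toList_slice (w : String) (i : Int) (h : 0 ≤ i) :
    (PySem.Str.slice w (some 0) (some i)).toList = w.toList.take i.toNat := by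
  rw [PySem.Str.toList_slice, PySem.Chars.slice_eq_listSlice, PySem.List.slice_zero_start]
  exact PySem.List.slice_to w.toList h

lemma pv_startswith_iff (w p : String) :
    PySem.Str.startswith w p = true ↔ p.toList <+: w.toList := by
  rw [PySem.Str.startswith_eq, PySem.Chars.startswith_iff]

-- the list of prefixes of one word contains p exactly once iff w starts with p (p nonempty)
lemma pv_count_prefixList (w p : String) (hp : p.toList ≠ []) :
    (((PySem.List.pyRange 1 (PySem.Str.len w + 1) 1)).map
      (fun i => PySem.Str.slice w (some 0) (some i))).count p
    = if PySem.Str.startswith w p then 1 else 0 := by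
  have hL1 : 1 ≤ p.toList.length := List.length_pos_iff.mpr hp
  rw [PySem.Str.len_eq, PySem.List.pyRange_one]
  have hn : ((w.toList.length : Int) + 1 - 1).toNat = w.toList.length := by omega
  rw [hn, List.map_map]
  have hsl : ∀ k : Nat, (PySem.Str.slice w (some 0) (some (1 + (k : Int)))).toList
      = w.toList.take (k + 1) := by
    intro k
    rw [pv_toList_slice w _ (by omega)]
    congr 1
    omega
  show List.countP (· == p) _ = _
  rw [List.countP_map]
  simp only [Function.comp_def]
  by_cases hpre : PySem.Str.startswith w p = true
  · rw [if_pos hpre]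
    have hpf : p.toList <+: w.toList := (pv_startswith_iff w p).mp hpre
    have hLn : p.toList.length ≤ w.toList.length := hpf.length_le
    have hcong : List.countP (fun k : Nat => PySem.Str.slice w (some 0) (some (1 + (k : Int))) == p)
        (List.range w.toList.length)
        = List.countP (fun k => k == p.toList.length - 1) (List.range w.toList.length) := by
      apply List.countP_congr
      intro k hk
      have hk' : k < w.toList.length := List.mem_range.mp hk
      simp only [beq_iff_eq]
      rw [← String.toList_inj, hsl k]
      constructor
      · intro h
        have hlen := congrArg List.length h
        simp only [List.length_take] at hlen
        omega
      · intro h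
        have hk1 : k + 1 = p.toList.length := by omega
        rw [hk1]
        exact (List.prefix_iff_eq_take.mp hpf).symm
    rw [hcong]
    show List.count _ _ = 1
    rw [List.count_range, if_pos (by omega)]
  · rw [if_neg hpre]
    rw [List.countP_eq_zero]
    intro k _
    simp only [beq_iff_eq]
    intro h
    apply hpre
    rw [pv_startswith_iff]
    rw [← String.toList_inj, hsl k] at h
    rw [← h]
    exact List.take_prefix _ _

-- total count of p among all prefixes = number of words starting with p (p nonempty)
lemma pv_count_all (words : List String) (p : String) (hp : p.toList ≠ []) :
    (pvAllPrefixes words).count p = words.countP (fun w2 => PySem.Str.startswith w2 p) := by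
  induction words with
  | nil => rfl
  | cons w ws ih =>
    rw [pvAllPrefixes, List.flatMap_cons, List.count_append, List.countP_cons,
      pv_count_prefixList w p hp]
    rw [pvAllPrefixes] at ih
    rw [ih]
    by_cases h : PySem.Str.startswith w p = true <;> simp only [h, if_true, if_false,
      Bool.false_eq_true] <;> omega

lemma pv_pre_ne_nil (w : String) (i : Int) (h1 : 1 ≤ i) (h2 : i < PySem.Str.len w) :
    (PySem.Str.slice w (some 0) (some i)).toList ≠ [] := by
  rw [pv_toList_slice w i (by omega)]
  rw [PySem.Str.len_eq] at h2
  intro h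
  have := congrArg List.length h
  simp only [List.length_take, List.length_nil] at this
  omega

-- ===== VERDICT (by name: the statement is the Claim_ definition above) =====
theorem unambiguous_prefixes_spec : Claim_equal_unambiguous_prefixes := by
  unfold Claim_equal_unambiguous_prefixes
  intro words _
  unfold Spec_unambiguous_prefixes
  have hA : unambiguous_prefixes words = words.flatMap (fun w =>
      ((PySem.List.pyRange 1 (PySem.Str.len w) 1).filter (fun i =>
        (words.foldl (fun n w2 =>
          if PySem.Str.startswith w2 (PySem.Str.slice w (some 0) (some i)) then n + 1 else n)
          (0 : Int)) == 1)).map (fun i => PySem.Str.slice w (some 0) (some i))) := by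
    unfold unambiguous_prefixes
    simp only [PySem.List.foldl_append_if, PySem.List.foldl_append_eq_flatMap, List.nil_append]
  have hB : unambiguous_prefixes_alt words = words.flatMap (fun w =>
      ((PySem.List.pyRange 1 (PySem.Str.len w) 1).filter (fun i =>
        ((pvAllPrefixes words).foldl (fun d p => d.insert p (d.getD p 0 + 1))
          (PySem.Dict.empty : PySem.Dict String Int)).getD
          (PySem.Str.slice w (some 0) (some i)) 0 == 1)).map
        (fun i => PySem.Str.slice w (some 0) (some i))) := by
    unfold unambiguous_prefixes_alt
    simp only [pv_filterMap_if]
  rw [hA, hB]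
  apply List.flatMap_congr
  intro w _
  congr 1
  apply List.filter_congr
  intro i hi
  have hmem := PySem.List.mem_pyRange_one.mp hi
  have hne : (PySem.Str.slice w (some 0) (some i)).toList ≠ [] :=
    pv_pre_ne_nil w i hmem.1 hmem.2
  have hcount : (List.foldl (fun d p => d.insert p (d.getD p 0 + 1))
      (PySem.Dict.empty : PySem.Dict String Int)
      (pvAllPrefixes words)).getD (PySem.Str.slice w (some 0) (some i)) 0
      = 0 + ((pvAllPrefixes words).count (PySem.Str.slice w (some 0) (some i)) : Int) := by
    have h2 := PySem.Dict.getD_foldl_insert_add_one (pvAllPrefixes words) PySem.Dict.empty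
      (PySem.Str.slice w (some 0) (some i))
    rw [PySem.Dict.getD_empty] at h2
    exact h2
  rw [PySem.List.foldl_if_add_one]
  have h : (List.foldl (fun d p => d.insert p (d.getD p 0 + 1))
      (PySem.Dict.empty : PySem.Dict String Int)
      (pvAllPrefixes words)).getD (PySem.Str.slice w (some 0) (some i)) 0
      = 0 + ((words.countP (fun w2 =>
          PySem.Str.startswith w2 (PySem.Str.slice w (some 0) (some i)))) : Int) := by
    rw [hcount, pv_count_all words _ hne]
  exact congrArg (fun z : Int => z == 1) h.symm
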